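-- pv_equiv track=rewrite | github.com/potocnikales/advent-of-code | day24.py | tokenise_line
-- ===== SOURCE A (Python) =====
-- def tokenise_line(line: str):
--     tokens = []
--     token = ""
--     for char in line:
--         if char in "sn":
--             token = char
--         else:
--             tokens.append(token + char)
--             token = ""
--     return tokens
-- ===== SOURCE B (Python) =====
-- import re
--
-- def tokenise_line(line: str):
--     # One regex scan: an optional single n/s prefix followed by exactly one
--     # non-n/s terminator; reproduces the loop's flush and overwrite-on-repeat.
--     return re.findall(r'[ns]?[^ns]', line)
-- ===== Notes on version B (the rewrite author's own statement) =====
-- stated objective: idiomatic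
-- what changed: Replaced the explicit character loop with mutable token state by a single regular-expression scan re.findall(r'[ns]?[^ns]', line).
import Mathlib
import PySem

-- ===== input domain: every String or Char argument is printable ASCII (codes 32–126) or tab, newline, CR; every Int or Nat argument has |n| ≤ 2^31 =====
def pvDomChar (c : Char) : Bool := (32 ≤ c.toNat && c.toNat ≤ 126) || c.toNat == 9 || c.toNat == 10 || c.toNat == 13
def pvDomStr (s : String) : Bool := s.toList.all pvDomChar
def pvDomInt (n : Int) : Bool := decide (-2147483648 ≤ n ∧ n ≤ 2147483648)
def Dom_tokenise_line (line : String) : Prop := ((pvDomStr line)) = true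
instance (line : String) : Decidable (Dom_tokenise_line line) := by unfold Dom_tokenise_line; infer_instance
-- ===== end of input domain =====

-- B replaces A's explicit loop with mutable token state by a single regex scan
-- re.findall(r'[ns]?[^ns]', line) (idiomatic; same return value, no side effects).


-- ===== PORT A =====
-- A's loop: state (tokens, token); token kept as List Char (string concat is list append).
def tlStep (st : List String × List Char) (c : Char) : List String × List Char :=
  if c = 's' ∨ c = 'n' then (st.1, [c])
  else (st.1 ++ [String.mk (st.2 ++ [c])], [])

def tokenise_line (line : String) : List String :=
  (line.toList.foldl tlStep ([], [])).1

-- ===== PORT B =====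
-- Hand port of re.findall(r'[ns]?[^ns]', line): left-to-right non-overlapping scan;
-- at each position, match optional n/s then one non-n/s char, else advance one char.
-- Exact for this pattern: a match is 'c d' (c∈ns, d∉ns), or 'c' (c∉ns); no match otherwise.
def reScan : List Char → List String
  | [] => []
  | [c] => if c = 'n' ∨ c = 's' then [] else [String.mk [c]]
  | c :: d :: rest =>
    if c = 'n' ∨ c = 's' then
      if d = 'n' ∨ d = 's' then reScan (d :: rest)
      else String.mk [c, d] :: reScan rest
    else String.mk [c] :: reScan (d :: rest)

def tokenise_line_alt (line : String) : List String :=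
  reScan line.toList

-- ===== PRECONDITION & SPEC =====
def Spec_tokenise_line (line : String) (out : List String) : Prop := out = tokenise_line_alt line
instance (line : String) (out : List String) : Decidable (Spec_tokenise_line line out) := by unfold Spec_tokenise_line; infer_instance

-- ===== CLAIM (what is proved, stated in full; the proofs are below) =====
def Claim_equal_tokenise_line : Prop := ∀ (line : String), Dom_tokenise_line line → Spec_tokenise_line line (tokenise_line line)

-- ===== LEMMAS AND PROOFS =====

-- A's result from token state t, tokens discharged.
def tlAux : List Char → List Char → List String
  | _, [] => []
  | t, c :: rest =>
    if c = 's' ∨ c = 'n' then tlAux [c] rest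
    else String.mk (t ++ [c]) :: tlAux [] rest

lemma reScan_cons_notns (c : Char) (l : List Char) (h : ¬ (c = 'n' ∨ c = 's')) :
    reScan (c :: l) = String.mk [c] :: reScan l := by
  cases l with
  | nil => simp [reScan, h]
  | cons d rest => simp [reScan, h]

lemma tlAux_eq (l : List Char) : ∀ t : List Char,
    (t = [] ∨ t = ['n'] ∨ t = ['s']) → tlAux t l = reScan (t ++ l) := by
  induction l with
  | nil =>
    intro t ht
    rcases ht with h | h | h <;> subst h <;> simp [tlAux, reScan]
  | cons c rest ih =>
    intro t ht
    by_cases hc : c = 's' ∨ c = 'n'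
    · have hc' : c = 'n' ∨ c = 's' := hc.symm
      have h1 : tlAux t (c :: rest) = tlAux [c] rest := by simp [tlAux, hc]
      have h2 : tlAux [c] rest = reScan (c :: rest) := by
        have := ih [c] (by rcases hc with h | h <;> simp [h])
        simpa using this
      rcases ht with h | h | h <;> subst h
      · simpa [h1] using h2
      · simp only [List.cons_append, List.nil_append]
        rw [h1, h2]
        simp [reScan, hc']
      · simp only [List.cons_append, List.nil_append]
        rw [h1, h2]
        simp [reScan, hc']
    · have hc' : ¬ (c = 'n' ∨ c = 's') := fun h => hc h.symm
      have h1 : tlAux t (c :: rest) = String.mk (t ++ [c]) :: tlAux [] rest := by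
        simp [tlAux, hc]
      have h2 : tlAux [] rest = reScan rest := by simpa using ih [] (Or.inl rfl)
      rcases ht with h | h | h <;> subst h
      · rw [h1, h2]
        simp [reScan_cons_notns c rest hc']
      · simp only [List.cons_append, List.nil_append]
        rw [h1, h2, show (['n'] ++ [c] : List Char) = ['n', c] from rfl]
        simp [reScan, hc']
      · simp only [List.cons_append, List.nil_append]
        rw [h1, h2, show (['s'] ++ [c] : List Char) = ['s', c] from rfl]
        simp [reScan, hc']

lemma foldl_tlStep (l : List Char) : ∀ (acc : List String) (t : List Char),
    (l.foldl tlStep (acc, t)).1 = acc ++ tlAux t l := by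
  induction l with
  | nil => intro acc t; simp [tlAux]
  | cons c rest ih =>
    intro acc t
    by_cases hc : c = 's' ∨ c = 'n'
    · simp only [List.foldl_cons, tlStep, hc, if_pos]
      rw [ih acc [c]]
      simp [tlAux, hc]
    · simp only [List.foldl_cons, tlStep, hc, if_neg, not_false_iff]
      rw [ih (acc ++ [String.mk (t ++ [c])]) []]
      simp [tlAux, hc]

-- ===== VERDICT (by name: the statement is the Claim_ definition above) =====
theorem tokenise_line_spec : Claim_equal_tokenise_line := by
  intro line _
  show tokenise_line line = tokenise_line_alt line
  unfold tokenise_line tokenise_line_alt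
  rw [foldl_tlStep]
  simpa using tlAux_eq line.toList [] (Or.inl rfl)
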